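-- pv_equiv track=rewrite | github.com/AdelNabli/MCN | MCN/MCN_curriculum/mcn_heuristic.py | original_names_actions_episode
-- ===== SOURCE A (Python) =====
-- def original_names_actions_episode(actions_episode, Phi, Lambda, exact_protection):
--
--     """Given the budgets and the list of ids of the actions taken during the episode,
--     find the ids of the actions in the original graph and returns the sets D, I, P
--
--     Parameters:
--     ----------
--     actions_episode: list,
--                      the actions taken by the experts during the episode
--                      must be "first action taken" at position 0
--     Phi, Lambda: int
--     exact_protection: bool,
--                       whether or not the exact algorithm was used for the protection phase
--
--     Returns:
--     -------
--     D, I, P: lists,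
--              nodes to vaccinate, attack, protect respectively """
--
--     # reverse the order of the list
--     all_actions = [action for action in reversed(actions_episode)]
--     # for all actions, starting from the last taken
--     # we iteratively rename the list of previous actions
--     # until we are at the first position
--     begin_rewrite = exact_protection * (Lambda + 1)
--     for k in range(begin_rewrite, len(actions_episode)):
--         current_action = all_actions[k]
--         previous_actions = all_actions[:k]
--         previous_actions = [
--             action if action < current_action else action + 1
--             for action in previous_actions
--         ]
--         all_actions[:k] = previous_actions
--
--     return (
--         all_actions[Lambda + Phi :],
--         all_actions[Lambda:Lambda + Phi],
--         all_actions[:Lambda],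
--     )
-- ===== SOURCE B (Python) =====
-- def original_names_actions_episode(actions_episode, Phi, Lambda, exact_protection):
--     """Recover original node ids back-to-front: walk the reversed actions from the
--     last rewrite step to the first, keeping a sorted list of already-recovered
--     original ids; each id is recovered by rank-selection against that list."""
--     n = len(actions_episode)
--     r = actions_episode[::-1]
--     begin = (Lambda + 1) if exact_protection else 0
--     if begin < 0:
--         begin = 0  # rewriting never starts before the first position
--
--     taken = []  # sorted list of original ids recovered so far
--     out = [0] * n
--
--     def recover(x):
--         v = x
--         for t in taken:
--             if t <= v:
--                 v += 1
--             else: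
--                 break
--         return v
--
--     for k in range(n - 1, begin - 1, -1):
--         v = recover(r[k])
--         out[k] = v
--         i = 0
--         while i < len(taken) and taken[i] <= v:
--             i += 1
--         taken.insert(i, v)
--
--     for j in range(min(begin, n)):
--         out[j] = recover(r[j])
--
--     return out[Lambda + Phi:], out[Lambda:Lambda + Phi], out[:Lambda]
-- ===== Notes on version B (the rewrite author's own statement) =====
-- stated objective: alternative
-- what changed: A rewrites the whole prefix of a mutable list in place once per action (forward loop of slice rewrites); B decodes back-to-front, maintaining a sorted list of already-recovered original ids and recovering each id by rank-selection (bump past every smaller-or-equal taken id) against it, then finishes the untouched prefix positions against the final sorted list.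
-- outside the precondition, e.g. on original_names_actions_episode([3, 1, 2], 1, -3, True): A returns ([1, 3], [6], []), B returns ([1, 3], [4], [])
import Mathlib
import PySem

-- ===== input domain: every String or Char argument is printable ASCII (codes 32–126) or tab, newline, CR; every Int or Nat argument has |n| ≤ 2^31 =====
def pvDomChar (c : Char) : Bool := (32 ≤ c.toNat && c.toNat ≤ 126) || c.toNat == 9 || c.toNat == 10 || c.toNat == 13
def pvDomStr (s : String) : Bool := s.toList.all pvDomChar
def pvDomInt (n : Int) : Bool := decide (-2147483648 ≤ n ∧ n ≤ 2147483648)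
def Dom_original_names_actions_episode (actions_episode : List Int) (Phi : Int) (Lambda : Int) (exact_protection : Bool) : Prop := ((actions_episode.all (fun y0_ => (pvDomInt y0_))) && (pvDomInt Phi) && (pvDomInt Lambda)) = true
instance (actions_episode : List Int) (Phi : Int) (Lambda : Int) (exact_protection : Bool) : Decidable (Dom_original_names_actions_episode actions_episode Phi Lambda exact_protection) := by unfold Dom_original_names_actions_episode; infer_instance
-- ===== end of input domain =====

-- B replaces A's forward in-place prefix-rewriting loop by a back-to-front decode:
-- it recovers each original id by rank-selection against a sorted list of the ids
-- already recovered (alternative decomposition; same asymptotic cost).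


-- ===== PORT A =====
-- one iteration of A's rewrite loop: slice assignment all_actions[:k] = relabelled prefix
def pvStepA (a : List Int) (k : Int) : List Int :=
  let current := PySem.List.pyGetD a k 0
  (PySem.List.slice a none (some k)).map (fun x => if x < current then x else x + 1)
    ++ PySem.List.slice a (some k) none

def original_names_actions_episode (actions_episode : List Int) (Phi : Int) (Lambda : Int) (exact_protection : Bool) : List Int × List Int × List Int :=
  let all_actions := actions_episode.reverse
  let begin_rewrite : Int := if exact_protection then Lambda + 1 else 0
  let a := (PySem.List.pyRange begin_rewrite (actions_episode.length : Int) 1).foldl pvStepA all_actions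
  (PySem.List.slice a (some (Lambda + Phi)) none,
   PySem.List.slice a (some Lambda) (some (Lambda + Phi)),
   PySem.List.slice a none (some Lambda))

-- ===== PORT B =====
-- Source B's `recover`: walk the sorted `taken` list, bumping past every id already used
def pvRecover : List Int → Int → Int
  | [], v => v
  | t :: ts, v => if t ≤ v then pvRecover ts (v + 1) else v

-- Source B's insertion (scan to the first element > v, insert there)
def pvInsert : List Int → Int → List Int
  | [], v => [v]
  | t :: ts, v => if t ≤ v then t :: pvInsert ts v else v :: t :: ts

-- Source B's descending k-loop as a right fold over the suffix r[begin:]: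
-- returns (recovered ids in position order, sorted `taken` list)
def pvDecode : List Int → List Int × List Int
  | [] => ([], [])
  | x :: xs =>
      let p := pvDecode xs
      let v := pvRecover p.2 x
      (v :: p.1, pvInsert p.2 v)

def original_names_actions_episode_alt (actions_episode : List Int) (Phi : Int) (Lambda : Int) (exact_protection : Bool) : List Int × List Int × List Int :=
  let r := actions_episode.reverse
  let bg : Int := if exact_protection then Lambda + 1 else 0
  let bg1 : Int := if bg < 0 then 0 else bg  -- Source B: if begin < 0: begin = 0
  let b : Nat := (min bg1 (r.length : Int)).toNat
  let p := pvDecode (r.drop b)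
  let out := (r.take b).map (pvRecover p.2) ++ p.1
  (PySem.List.slice out (some (Lambda + Phi)) none,
   PySem.List.slice out (some Lambda) (some (Lambda + Phi)),
   PySem.List.slice out none (some Lambda))

-- ===== PRECONDITION & SPEC =====
-- Pre_ restricts to the natural domain of the budget Lambda: with exact_protection and
-- Lambda < -1 (a negative budget, outside the function's purpose) A's begin_rewrite is
-- negative, so its loop runs through Python negative-index wraparound (and raises
-- IndexError when Lambda + 1 < -len); such inputs are excluded.
def Pre_original_names_actions_episode (actions_episode : List Int) (Phi : Int) (Lambda : Int) (exact_protection : Bool) : Prop :=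
  exact_protection = true → -1 ≤ Lambda
instance (actions_episode : List Int) (Phi : Int) (Lambda : Int) (exact_protection : Bool) : Decidable (Pre_original_names_actions_episode actions_episode Phi Lambda exact_protection) := by unfold Pre_original_names_actions_episode; infer_instance
def pvWitness_original_names_actions_episode : List Int × Int × Int × Bool := ([2, 0, 1, 0], 1, 1, true)

def Spec_original_names_actions_episode (actions_episode : List Int) (Phi : Int) (Lambda : Int) (exact_protection : Bool) (out : List Int × List Int × List Int) : Prop := out = original_names_actions_episode_alt actions_episode Phi Lambda exact_protection
instance (actions_episode : List Int) (Phi : Int) (Lambda : Int) (exact_protection : Bool) (out : List Int × List Int × List Int) : Decidable (Spec_original_names_actions_episode actions_episode Phi Lambda exact_protection out) := by unfold Spec_original_names_actions_episode; infer_instance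

-- ===== CLAIM (what is proved, stated in full; the proofs are below) =====
def Claim_equal_original_names_actions_episode : Prop := ∀ (actions_episode : List Int) (Phi : Int) (Lambda : Int) (exact_protection : Bool), Dom_original_names_actions_episode actions_episode Phi Lambda exact_protection → Pre_original_names_actions_episode actions_episode Phi Lambda exact_protection → Spec_original_names_actions_episode actions_episode Phi Lambda exact_protection (original_names_actions_episode actions_episode Phi Lambda exact_protection)

-- ===== LEMMAS AND PROOFS =====

-- proof-side characterisation of A: value at (reversed) position j after all rewrite
-- steps below bound m, as one fold over the raw later entries
def pvElemB (r : List Int) (bg m : Int) (j : Int) : Int :=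
  (PySem.List.pyRange (max (j + 1) bg) m 1).foldl
    (fun v k => if v ≥ PySem.List.pyGetD r k 0 then v + 1 else v)
    (PySem.List.pyGetD r j 0)

-- the same fold, on a plain list of values
def pvG (x : Int) (l : List Int) : Int :=
  l.foldl (fun v t => if v ≥ t then v + 1 else v) x

-- the empty-range fold: each position's value is its own entry
lemma pv_map_range_get (r : List Int) :
    (List.range r.length).map (fun (j : Nat) => PySem.List.pyGetD r (j : Int) 0) = r := by
  apply List.ext_getElem
  · simp
  · intro i h1 h2
    simp [PySem.List.pyGetD_natCast, List.getD_eq_getElem?_getD, List.getElem?_eq_getElem h2]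

-- pvElemB over an empty step range is the entry itself
lemma pv_elem_base (r : List Int) (bg m : Int) (hm : m ≤ bg) (j : Int) :
    pvElemB r bg m j = PySem.List.pyGetD r j 0 := by
  unfold pvElemB
  rw [PySem.List.pyRange_one_eq_nil (by omega)]
  rfl

-- at its own step, the current value is still the original entry
lemma pv_elem_self (r : List Int) (bg m : Int) (hbm : bg ≤ m) :
    pvElemB r bg m m = PySem.List.pyGetD r m 0 := by
  unfold pvElemB
  rw [PySem.List.pyRange_one_eq_nil (by omega)]
  rfl

-- extending position j's step range by one more later action applies A's relabelling to it
lemma pv_elem_succ_lt (r : List Int) (bg m j : Int) (hbm : bg ≤ m) (hj : j < m) :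
    pvElemB r bg (m + 1) j
      = if pvElemB r bg m j < PySem.List.pyGetD r m 0 then pvElemB r bg m j
        else pvElemB r bg m j + 1 := by
  unfold pvElemB
  rw [PySem.List.pyRange_one_succ_right (by omega), List.foldl_append]
  simp only [List.foldl_cons, List.foldl_nil]
  split_ifs with h1 h2 h2 <;> omega

-- positions at or after the step are untouched by it
lemma pv_elem_stable (r : List Int) (bg m j : Int) (hj : m ≤ j) :
    pvElemB r bg (m + 1) j = pvElemB r bg m j := by
  unfold pvElemB
  rw [PySem.List.pyRange_one_eq_nil (by omega), PySem.List.pyRange_one_eq_nil (by omega)]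

-- relabel-prefix-and-keep-suffix on a map over range, pointwise
lemma pv_rewrite_map (f g : Nat → Int) (c : Int) (n mt : Nat) (hmt : mt ≤ n)
    (h1 : ∀ j : Nat, j < mt → g j = if f j < c then f j else f j + 1)
    (h2 : ∀ j : Nat, mt ≤ j → j < n → g j = f j) :
    (((List.range n).map f).take mt).map (fun x => if x < c then x else x + 1)
      ++ ((List.range n).map f).drop mt
    = (List.range n).map g := by
  apply List.ext_getElem
  · simp
    omega
  · intro i hi1 hi2
    simp only [List.length_map, List.length_range] at hi2
    by_cases hc : i < mt
    · rw [List.getElem_append_left (by simp; omega)]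
      simp only [List.getElem_map, List.getElem_take, List.getElem_range]
      exact (h1 i hc).symm
    · rw [List.getElem_append_right (by simp; omega)]
      simp only [List.length_map, List.length_take, List.getElem_drop, List.getElem_map,
        List.getElem_range]
      rw [h2]
      · congr 1
        simp only [List.length_range]
        omega
      · omega
      · omega

-- one rewrite step of A on the map-form list
lemma pv_step (r : List Int) (bg m : Int) (hb : 0 ≤ bg) (hbm : bg ≤ m) (hm : m < (r.length : Int)) :
    pvStepA ((List.range r.length).map (fun (j : Nat) => pvElemB r bg m (j : Int))) m
      = (List.range r.length).map (fun (j : Nat) => pvElemB r bg (m + 1) (j : Int)) := by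
  have hm0 : 0 ≤ m := by omega
  have hmt : (m.toNat : Int) = m := Int.toNat_of_nonneg hm0
  have hmn : m.toNat < r.length := by omega
  have hget : PySem.List.pyGetD ((List.range r.length).map (fun (j : Nat) => pvElemB r bg m (j : Int))) m 0
      = PySem.List.pyGetD r m 0 := by
    rw [← hmt, PySem.List.pyGetD_natCast, List.getD_eq_getElem?_getD,
      List.getElem?_eq_getElem (by simpa using hmn)]
    simp only [Option.getD_some, List.getElem_map, List.getElem_range]
    rw [hmt, pv_elem_self r bg m hbm]
  unfold pvStepA
  simp only [hget]
  rw [PySem.List.slice_to _ hm0, PySem.List.slice_from _ hm0]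
  apply pv_rewrite_map _ _ _ _ _ (by omega)
  · intro j hj
    rw [pv_elem_succ_lt r bg m j hbm (by omega)]
  · intro j hj1 hj2
    rw [pv_elem_stable r bg m j (by omega)]

-- main invariant: A's rewrite loop up to step bg + t produces the per-position folds
lemma pv_inv (r : List Int) (bg : Int) (hb : 0 ≤ bg) (t : Nat)
    (ht : bg + (t : Int) ≤ (r.length : Int)) :
    (PySem.List.pyRange bg (bg + (t : Int)) 1).foldl pvStepA r
      = (List.range r.length).map (fun (j : Nat) => pvElemB r bg (bg + (t : Int)) (j : Int)) := by
  induction t with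
  | zero =>
      rw [show bg + ((0 : Nat) : Int) = bg by omega]
      rw [PySem.List.pyRange_one_eq_nil (by omega)]
      simp only [List.foldl_nil]
      have heq : ∀ j : Nat, pvElemB r bg bg (j : Int) = PySem.List.pyGetD r (j : Int) 0 :=
        fun j => pv_elem_base r bg bg (Int.le_refl bg) j
      simp only [heq]
      exact (pv_map_range_get r).symm
  | succ t ih =>
      have h2 : bg ≤ bg + (t : Int) := by omega
      rw [show bg + ((t + 1 : Nat) : Int) = (bg + (t : Int)) + 1 by omega]
      rw [PySem.List.pyRange_one_succ_right h2, List.foldl_append]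
      rw [ih (by omega)]
      exact pv_step r bg (bg + (t : Int)) hb h2 (by omega)

-- pvElemB is pvG over the dropped suffix
lemma pv_elem_eq_pvG (r : List Int) (bg : Int) (j : Nat) (hb : 0 ≤ bg) (hj : j < r.length) :
    pvElemB r bg (r.length : Int) (j : Int)
      = pvG r[j] (r.drop (max ((j : Int) + 1) bg).toNat) := by
  unfold pvElemB pvG
  rw [PySem.List.foldl_pyRange_pyGetD' r 0
        (fun v t => if v ≥ t then v + 1 else v)
        (PySem.List.pyGetD r (j : Int) 0) (by omega)]
  rw [PySem.List.pyGetD_natCast, List.getD_eq_getElem?_getD, List.getElem?_eq_getElem hj]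
  rfl

-- v never decreases under pvRecover
lemma pv_recover_ge : ∀ (T : List Int) (v : Int), v ≤ pvRecover T v := by
  intro T
  induction T with
  | nil => intro v; simp [pvRecover]
  | cons t ts ih =>
      intro v
      simp only [pvRecover]
      split_ifs with h
      · have := ih (v + 1); omega
      · omega

-- membership in pvInsert
lemma pv_mem_insert {x v : Int} : ∀ {T : List Int}, x ∈ pvInsert T v → x = v ∨ x ∈ T := by
  intro T
  induction T with
  | nil => intro h; simp [pvInsert] at h; exact Or.inl h
  | cons t ts ih =>
      intro h
      simp only [pvInsert] at h
      split_ifs at h with hc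
      · rcases List.mem_cons.mp h with h | h
        · exact Or.inr (List.mem_cons.mpr (Or.inl h))
        · rcases ih h with h | h
          · exact Or.inl h
          · exact Or.inr (List.mem_cons.mpr (Or.inr h))
      · rcases List.mem_cons.mp h with h | h
        · exact Or.inl h
        · exact Or.inr h

-- pvInsert preserves sortedness
lemma pv_insert_sorted : ∀ (T : List Int), T.Pairwise (· ≤ ·) → ∀ v, (pvInsert T v).Pairwise (· ≤ ·) := by
  intro T
  induction T with
  | nil => intro _ v; simp [pvInsert]
  | cons t ts ih =>
      intro hs v
      rcases List.pairwise_cons.mp hs with ⟨hts, hsts⟩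
      simp only [pvInsert]
      split_ifs with hc
      · refine List.pairwise_cons.mpr ⟨?_, ih hsts v⟩
        intro x hx
        rcases pv_mem_insert hx with h | h
        · omega
        · exact hts x h
      · refine List.pairwise_cons.mpr ⟨?_, hs⟩
        intro x hx
        rcases List.mem_cons.mp hx with h | h
        · omega
        · have := hts x h; omega

-- KEY LEMMA: recovering against taken ∪ {recover(taken, a)} is the same as applying
-- A's raw relabelling step for a first and then recovering against taken
lemma pv_recover_insert : ∀ (T : List Int), T.Pairwise (· ≤ ·) → ∀ (a x : Int),
    pvRecover (pvInsert T (pvRecover T a)) x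
      = pvRecover T (if x ≥ a then x + 1 else x) := by
  intro T
  induction T with
  | nil =>
      intro _ a x
      simp only [pvRecover, pvInsert]
  | cons t ts ih =>
      intro hs a x
      rcases List.pairwise_cons.mp hs with ⟨hts, hsts⟩
      by_cases hta : t ≤ a
      · -- recover (t::ts) a = recover ts (a+1) =: b', and t ≤ b'
        have hb' : t ≤ pvRecover ts (a + 1) := by
          have := pv_recover_ge ts (a + 1); omega
        rw [show pvRecover (t :: ts) a = pvRecover ts (a + 1) by simp [pvRecover, hta]]
        rw [show pvInsert (t :: ts) (pvRecover ts (a + 1))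
              = t :: pvInsert ts (pvRecover ts (a + 1)) by simp [pvInsert, hb']]
        by_cases htx : t ≤ x
        · have h1 : t ≤ (if x ≥ a then x + 1 else x) := by split_ifs <;> omega
          rw [show pvRecover (t :: pvInsert ts (pvRecover ts (a + 1))) x
                = pvRecover (pvInsert ts (pvRecover ts (a + 1))) (x + 1) by
              simp [pvRecover, htx]]
          rw [show pvRecover (t :: ts) (if x ≥ a then x + 1 else x)
                = pvRecover ts ((if x ≥ a then x + 1 else x) + 1) by
              simp only [pvRecover, if_pos h1]]
          rw [ih hsts (a + 1) (x + 1)]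
          congr 1
          split_ifs <;> omega
        · have hxa : ¬ x ≥ a := by omega
          rw [show (if x ≥ a then x + 1 else x) = x by simp [hxa]]
          simp only [pvRecover, if_neg htx]
      · -- recover (t::ts) a = a, inserted at the front
        rw [show pvRecover (t :: ts) a = a by simp [pvRecover, hta]]
        rw [show pvInsert (t :: ts) a = a :: t :: ts by simp [pvInsert, hta]]
        by_cases hax : a ≤ x
        · rw [show pvRecover (a :: t :: ts) x = pvRecover (t :: ts) (x + 1) by
              simp [pvRecover, hax]]
          congr 1
          split_ifs <;> omega
        · rw [show pvRecover (a :: t :: ts) x = x by simp [pvRecover, hax]]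
          have : ¬ x ≥ a := by omega
          rw [if_neg this]
          have htx : ¬ t ≤ x := by omega
          simp [pvRecover, htx]

-- the taken list of pvDecode is sorted
lemma pv_decode_sorted : ∀ (l : List Int), (pvDecode l).2.Pairwise (· ≤ ·) := by
  intro l
  induction l with
  | nil => simp [pvDecode]
  | cons x xs ih => exact pv_insert_sorted _ ih _

-- recovering against the full taken list is the raw fold over the suffix
lemma pv_decode_recover : ∀ (l : List Int) (x : Int), pvRecover (pvDecode l).2 x = pvG x l := by
  intro l
  induction l with
  | nil => intro x; rfl
  | cons a xs ih =>
      intro x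
      show pvRecover (pvInsert (pvDecode xs).2 (pvRecover (pvDecode xs).2 a)) x = _
      rw [pv_recover_insert _ (pv_decode_sorted xs) a x]
      rw [ih]
      rfl

lemma pv_decode_length : ∀ (l : List Int), (pvDecode l).1.length = l.length := by
  intro l
  induction l with
  | nil => rfl
  | cons a xs ih => simpa [pvDecode] using ih

-- each decoded position is the raw fold of its entry over the later entries
lemma pv_decode_getElem : ∀ (l : List Int) (i : Nat) (h : i < l.length),
    (pvDecode l).1[i]'(by rw [pv_decode_length]; exact h) = pvG l[i] (l.drop (i + 1)) := by
  intro l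
  induction l with
  | nil => intro i h; simp at h
  | cons a xs ih =>
      intro i h
      match i with
      | 0 =>
          show pvRecover (pvDecode xs).2 a = _
          rw [pv_decode_recover]
          simp
      | (j + 1) =>
          have hj : j < xs.length := by simpa using h
          simpa [pvDecode] using ih j hj

-- ===== VERDICT (by name: the statement is the Claim_ definition above) =====
theorem original_names_actions_episode_spec : Claim_equal_original_names_actions_episode := by
  intro xs Phi Lambda ep _ hpre
  unfold Pre_original_names_actions_episode at hpre
  unfold Spec_original_names_actions_episode
  simp only [original_names_actions_episode, original_names_actions_episode_alt]
  have hb0 : (0 : Int) ≤ (if ep = true then Lambda + 1 else 0) := by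
    cases ep
    · simp
    · simp
      have := hpre rfl
      omega
  rw [show (xs.length : Int) = (xs.reverse.length : Int) by simp]
  generalize hg : (if ep = true then Lambda + 1 else 0) = bg
  rw [hg] at hb0
  generalize xs.reverse = r
  rw [show (if bg < 0 then 0 else bg) = bg by rw [if_neg (by omega)]]
  suffices h : (PySem.List.pyRange bg (r.length : Int) 1).foldl pvStepA r
      = (r.take (min bg (r.length : Int)).toNat).map
          (pvRecover (pvDecode (r.drop (min bg (r.length : Int)).toNat)).2)
        ++ (pvDecode (r.drop (min bg (r.length : Int)).toNat)).1 by
    rw [h]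
  generalize hbdef : (min bg (r.length : Int)).toNat = b
  have hbn : b ≤ r.length := by omega
  have hbint : (b : Int) = min bg (r.length : Int) := by omega
  have hAmap : (PySem.List.pyRange bg (r.length : Int) 1).foldl pvStepA r
      = (List.range r.length).map (fun (j : Nat) => pvElemB r bg (r.length : Int) (j : Int)) := by
    by_cases hc : bg ≤ (r.length : Int)
    · rw [show (r.length : Int) = bg + ((((r.length : Int) - bg).toNat : Int)) by omega]
      exact pv_inv r bg hb0 _ (by omega)
    · rw [PySem.List.pyRange_one_eq_nil (by omega)]
      simp only [List.foldl_nil]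
      have heq : ∀ j : Nat, pvElemB r bg (r.length : Int) (j : Int) = PySem.List.pyGetD r (j : Int) 0 :=
        fun j => pv_elem_base r bg _ (by omega) j
      simp only [heq]
      exact (pv_map_range_get r).symm
  rw [hAmap]
  apply List.ext_getElem
  · simp [pv_decode_length, hbn]
  · intro i hi1 hi2
    simp only [List.length_map, List.length_range] at hi1
    simp only [List.getElem_map, List.getElem_range]
    rw [pv_elem_eq_pvG r bg i hb0 hi1]
    by_cases hib : i < b
    · rw [List.getElem_append_left (by rw [List.length_map, List.length_take]; omega)]
      simp only [List.getElem_map, List.getElem_take]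
      rw [pv_decode_recover]
      have hdrop : r.drop (max ((i : Int) + 1) bg).toNat = r.drop b := by
        by_cases hc : bg ≤ (r.length : Int)
        · have hmb : (max ((i : Int) + 1) bg).toNat = b := by omega
          rw [hmb]
        · rw [List.drop_eq_nil_of_le (by omega), List.drop_eq_nil_of_le (by omega)]
      rw [hdrop]
    · have hlen : ((r.take b).map (pvRecover (pvDecode (r.drop b)).2)).length = b := by
        simp [hbn]
      rw [List.getElem_append_right (by rw [hlen]; omega)]
      have hidx : i - ((r.take b).map (pvRecover (pvDecode (r.drop b)).2)).length
          = i - b := by rw [hlen]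
      have hdlt : i - b < (r.drop b).length := by simp; omega
      have := pv_decode_getElem (r.drop b) (i - b) hdlt
      simp only [hidx]
      rw [List.getElem_of_eq rfl, this]
      rw [List.getElem_drop]
      have h1 : b + (i - b) = i := by omega
      have hmax : (max ((i : Int) + 1) bg).toNat = i + 1 := by
        omega
      rw [hmax, List.drop_drop]
      have h3 : b + (i - b + 1) = i + 1 := by omega
      have h3' : i - b + 1 + b = i + 1 := by omega
      simp only [h1, h3]
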